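-- pv_equiv track=rewrite | github.com/rmulligan/lilly-steering | core/cognitive/simulation/engine.py | _normalize_claim_with_synonyms
-- ===== SOURCE A (Python) =====
-- METRIC_SYNONYMS: dict[str, tuple[str, bool]] = {
--     # Coherence/understanding → semantic entropy (inverted: coherence up = entropy down)
--     "coherence": ("semantic_entropy", True),
--     "understanding": ("self_understanding", False),
--     "self-understanding": ("self_understanding", False),
--     "self understanding": ("self_understanding", False),
--     # Complexity/structure
--     "complexity": ("structural_entropy", False),
--     "structure": ("structural_entropy", False),
--     "organization": ("structural_entropy", True),  # More organized = less entropy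
--     # Connectivity
--     "connectivity": ("edge_count", False),
--     "connections": ("edge_count", False),
--     "connectedness": ("edge_count", False),
--     # Growth metrics
--     "knowledge": ("node_count", False),
--     "knowledge base": ("node_count", False),
--     # Exploration
--     "exploration": ("discovery_parameter", False),
--     "curiosity": ("discovery_parameter", False),
--     # Diversity
--     "diversity": ("semantic_entropy", False),
--     "variety": ("semantic_entropy", False),
--     # Concentration
--     "focus": ("hub_concentration", False),
--     "centralization": ("hub_concentration", False),
--     # Isolation
--     "isolation": ("orphan_rate", False),
--     "fragmentation": ("orphan_rate", False),
-- }
--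
-- def _normalize_claim_with_synonyms(claim: str) -> tuple[str, bool]:
--     """Normalize natural language terms to metric names.
--
--     Args:
--         claim: The original claim text
--
--     Returns:
--         Tuple of (normalized_claim, direction_inverted)
--         direction_inverted is True if the synonym implies inverted direction
--     """
--     claim_lower = claim.lower()
--     direction_inverted = False
--
--     # Sort by length (longest first) to match multi-word terms first
--     for term, (metric, invert) in sorted(
--         METRIC_SYNONYMS.items(), key=lambda x: len(x[0]), reverse=True
--     ):
--         if term in claim_lower:
--             # Replace the natural language term with the metric name
--             claim_lower = claim_lower.replace(term, metric)
--             if invert: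
--                 direction_inverted = True
--             break  # Only replace the first match
--
--     return claim_lower, direction_inverted
-- ===== SOURCE B (Python) =====
-- # Same synonym mapping as METRIC_SYNONYMS, stored grouped by (metric, invert).
-- # Flattened in order, the terms appear exactly in METRIC_SYNONYMS insertion order.
-- METRIC_GROUPS: list[tuple[str, bool, list[str]]] = [
--     ("semantic_entropy", True, ["coherence"]),
--     ("self_understanding", False, ["understanding", "self-understanding", "self understanding"]),
--     ("structural_entropy", False, ["complexity", "structure"]),
--     ("structural_entropy", True, ["organization"]),
--     ("edge_count", False, ["connectivity", "connections", "connectedness"]),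
--     ("node_count", False, ["knowledge", "knowledge base"]),
--     ("discovery_parameter", False, ["exploration", "curiosity"]),
--     ("semantic_entropy", False, ["diversity", "variety"]),
--     ("hub_concentration", False, ["focus", "centralization"]),
--     ("orphan_rate", False, ["isolation", "fragmentation"]),
-- ]
--
--
-- def _normalize_claim_with_synonyms(claim: str) -> tuple[str, bool]:
--     """Single pass over the grouped table keeping the best (longest) matching
--     term so far; a strict ">" keeps the earliest term among equal lengths,
--     which reproduces A's stable length-sort tie-breaking. No per-call sort."""
--     claim_lower = claim.lower()
--     best = None  # (term, metric, invert)
--     for metric, invert, terms in METRIC_GROUPS: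
--         for term in terms:
--             if term in claim_lower and (best is None or len(term) > len(best[0])):
--                 best = (term, metric, invert)
--     if best is None:
--         return claim_lower, False
--     term, metric, invert = best
--     return claim_lower.replace(term, metric), invert
-- ===== Notes on version B (the rewrite author's own statement) =====
-- stated objective: alternative
-- what changed: Replaces the per-call stable length-sort of the synonym table followed by a first-match-and-break scan with a single best-so-far pass (strict '>' on term length, which reproduces the stable sort's insertion-order tie-breaking) over the same mapping stored grouped by (metric, invert).
import Mathlib
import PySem

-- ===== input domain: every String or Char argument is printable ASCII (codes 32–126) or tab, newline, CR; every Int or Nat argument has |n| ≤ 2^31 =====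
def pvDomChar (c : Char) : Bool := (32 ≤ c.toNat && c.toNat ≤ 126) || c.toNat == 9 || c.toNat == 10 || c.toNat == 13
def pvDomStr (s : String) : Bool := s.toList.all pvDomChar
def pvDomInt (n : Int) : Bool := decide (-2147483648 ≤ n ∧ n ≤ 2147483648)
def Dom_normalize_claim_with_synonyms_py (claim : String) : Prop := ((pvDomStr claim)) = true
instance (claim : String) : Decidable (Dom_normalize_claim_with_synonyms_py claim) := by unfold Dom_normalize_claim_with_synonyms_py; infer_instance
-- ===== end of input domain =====

-- B replaces A's per-call sort-then-first-match by a single best-so-far pass (strict ">")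
-- over the same mapping stored grouped by (metric, invert) — alternative decomposition, no sort.

-- ===== PORT A =====
-- METRIC_SYNONYMS, a module-level dict constant
def pvSyn : PySem.Dict String (String × Bool) := PySem.Dict.ofList
  [("coherence", "semantic_entropy", true),
   ("understanding", "self_understanding", false),
   ("self-understanding", "self_understanding", false),
   ("self understanding", "self_understanding", false),
   ("complexity", "structural_entropy", false),
   ("structure", "structural_entropy", false),
   ("organization", "structural_entropy", true),
   ("connectivity", "edge_count", false),
   ("connections", "edge_count", false),
   ("connectedness", "edge_count", false),
   ("knowledge", "node_count", false),
   ("knowledge base", "node_count", false),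
   ("exploration", "discovery_parameter", false),
   ("curiosity", "discovery_parameter", false),
   ("diversity", "semantic_entropy", false),
   ("variety", "semantic_entropy", false),
   ("focus", "hub_concentration", false),
   ("centralization", "hub_concentration", false),
   ("isolation", "orphan_rate", false),
   ("fragmentation", "orphan_rate", false)]

-- A's for-loop with break: first matching term of the sorted item list wins;
-- direction_inverted starts False and is set to True exactly when the match has invert=True.
def pvLoopA : List (String × String × Bool) → String → String × Bool
  | [], claim_lower => (claim_lower, false)
  | (term, metric, invert) :: rest, claim_lower =>
    if PySem.Str.isIn term claim_lower then
      (PySem.Str.replace claim_lower term metric, if invert then true else false)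
    else pvLoopA rest claim_lower

def normalize_claim_with_synonyms_py (claim : String) : String × Bool :=
  pvLoopA
    (PySem.List.sorted pvSyn.items (fun e => PySem.Str.len e.1) true)
    (PySem.Str.lower claim)

-- ===== PORT B =====
-- METRIC_GROUPS: the same mapping, grouped by (metric, invert)
def pvGroups : List (String × Bool × List String) :=
  [("semantic_entropy", true, ["coherence"]),
   ("self_understanding", false, ["understanding", "self-understanding", "self understanding"]),
   ("structural_entropy", false, ["complexity", "structure"]),
   ("structural_entropy", true, ["organization"]),
   ("edge_count", false, ["connectivity", "connections", "connectedness"]),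
   ("node_count", false, ["knowledge", "knowledge base"]),
   ("discovery_parameter", false, ["exploration", "curiosity"]),
   ("semantic_entropy", false, ["diversity", "variety"]),
   ("hub_concentration", false, ["focus", "centralization"]),
   ("orphan_rate", false, ["isolation", "fragmentation"])]

-- the body of B's inner for-loop: keep the best (strictly longer) matching term so far
def pvUpd (cl metric : String) (invert : Bool)
    (best : Option (String × String × Bool)) (term : String) :
    Option (String × String × Bool) :=
  if PySem.Str.isIn term cl &&
      (match best with
       | none => true
       | some b => decide (PySem.Str.len b.1 < PySem.Str.len term)) then
    some (term, metric, invert)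
  else best

def normalize_claim_with_synonyms_py_alt (claim : String) : String × Bool :=
  let claim_lower := PySem.Str.lower claim
  let best := pvGroups.foldl
    (fun best g => g.2.2.foldl (pvUpd claim_lower g.1 g.2.1) best) none
  match best with
  | none => (claim_lower, false)
  | some (term, metric, invert) => (PySem.Str.replace claim_lower term metric, invert)

-- ===== PRECONDITION & SPEC =====
def Spec_normalize_claim_with_synonyms_py (claim : String) (out : String × Bool) : Prop := out = normalize_claim_with_synonyms_py_alt claim
instance (claim : String) (out : String × Bool) : Decidable (Spec_normalize_claim_with_synonyms_py claim out) := by unfold Spec_normalize_claim_with_synonyms_py; infer_instance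

-- ===== CLAIM (what is proved, stated in full; the proofs are below) =====
def Claim_equal_normalize_claim_with_synonyms_py : Prop := ∀ (claim : String), Dom_normalize_claim_with_synonyms_py claim → Spec_normalize_claim_with_synonyms_py claim (normalize_claim_with_synonyms_py claim)

-- ===== LEMMAS AND PROOFS =====

-- the original item list, flat, as a literal
def pvL : List (String × String × Bool) :=
  [("coherence", "semantic_entropy", true),
   ("understanding", "self_understanding", false),
   ("self-understanding", "self_understanding", false),
   ("self understanding", "self_understanding", false),
   ("complexity", "structural_entropy", false),
   ("structure", "structural_entropy", false),
   ("organization", "structural_entropy", true),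
   ("connectivity", "edge_count", false),
   ("connections", "edge_count", false),
   ("connectedness", "edge_count", false),
   ("knowledge", "node_count", false),
   ("knowledge base", "node_count", false),
   ("exploration", "discovery_parameter", false),
   ("curiosity", "discovery_parameter", false),
   ("diversity", "semantic_entropy", false),
   ("variety", "semantic_entropy", false),
   ("focus", "hub_concentration", false),
   ("centralization", "hub_concentration", false),
   ("isolation", "orphan_rate", false),
   ("fragmentation", "orphan_rate", false)]

def pvKey (e : String × String × Bool) : Int := PySem.Str.len e.1

def pvKs : List Int := [18, 14, 13, 12, 11, 10, 9, 7, 5]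

-- the foldl step of Python max(key=…): keep the current maximum on ties
def pvStep {α : Type} (key : α → Int) (acc : Option α) (x : α) : Option α :=
  match acc with
  | none => some x
  | some m => if key m < key x then some x else some m

lemma pvMax?_eq_foldl {α : Type} (key : α → Int) (xs : List α) :
    PySem.List.max? xs key = xs.foldl (pvStep key) none := rfl

lemma pvFoldl_some {α : Type} (key : α → Int) (v : List α) (m : α)
    (h : ∀ e ∈ v, key e ≤ key m) : v.foldl (pvStep key) (some m) = some m := by
  induction v with
  | nil => rfl
  | cons x t ih =>
    have hx : ¬ key m < key x := not_lt.mpr (h x (List.mem_cons_self))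
    simp only [List.foldl_cons, pvStep, if_neg hx]
    exact ih (fun e he => h e (List.mem_cons_of_mem _ he))

lemma pvFoldl_cases {α : Type} (key : α → Int) (u : List α) :
    ∀ acc : Option α, u.foldl (pvStep key) acc = acc ∨
      ∃ m ∈ u, u.foldl (pvStep key) acc = some m := by
  induction u with
  | nil => intro acc; exact Or.inl rfl
  | cons x t ih =>
    intro acc
    have hstep : pvStep key acc x = acc ∨ pvStep key acc x = some x := by
      cases acc with
      | none => exact Or.inr rfl
      | some m =>
        simp only [pvStep]
        split_ifs
        · exact Or.inr rfl
        · exact Or.inl rfl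
    rcases ih (pvStep key acc x) with h | ⟨m, hm, h⟩
    · rcases hstep with h' | h'
      · exact Or.inl (by rw [List.foldl_cons, h, h'])
      · exact Or.inr ⟨x, List.mem_cons_self, by rw [List.foldl_cons, h, h']⟩
    · exact Or.inr ⟨m, List.mem_cons_of_mem _ hm, by rw [List.foldl_cons, h]⟩

-- Python max returns the FIRST element of maximal key
lemma pvMax?_first {α : Type} (key : α → Int) (u v : List α) (a : α)
    (hu : ∀ e ∈ u, key e < key a) (hv : ∀ e ∈ v, key e ≤ key a) :
    PySem.List.max? (u ++ a :: v) key = some a := by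
  rw [pvMax?_eq_foldl, List.foldl_append]
  have hstep : pvStep key (u.foldl (pvStep key) none) a = some a := by
    rcases pvFoldl_cases key u none with h | ⟨m, hm, h⟩
    · rw [h]; rfl
    · rw [h]; simp [pvStep, hu m hm]
  simp only [List.foldl_cons, hstep]
  exact pvFoldl_some key v a hv

-- argmax over F = head of the concatenation of F's key-groups in strictly descending key order
lemma pvMax?_groups {α : Type} (key : α → Int) (ks : List Int) (F : List α)
    (hks : ks.Pairwise (· > ·)) (hmem : ∀ e ∈ F, key e ∈ ks) :
    PySem.List.max? F key =
      (ks.flatMap (fun k => F.filter (fun e => key e == k))).head? := by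
  induction ks with
  | nil =>
    cases F with
    | nil => rfl
    | cons x t => exact absurd (hmem x List.mem_cons_self) (List.not_mem_nil)
  | cons k ks ih =>
    cases hA : F.filter (fun e => key e == k) with
    | nil =>
      have hmem' : ∀ e ∈ F, key e ∈ ks := by
        intro e he
        rcases List.mem_cons.mp (hmem e he) with h | h
        · exfalso
          have : e ∈ F.filter (fun e => key e == k) := by
            simp [List.mem_filter, he, h]
          rw [hA] at this; exact List.not_mem_nil this
        · exact h
      rw [ih hks.of_cons hmem']
      simp [List.flatMap_cons, hA]
    | cons a t =>
      have hlt : ∀ j ∈ ks, j < k := fun j hj => (List.pairwise_cons.mp hks).1 j hj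
      rcases List.filter_eq_cons_iff.mp hA with ⟨u, v, hF, hu, ha, _⟩
      have hak : key a = k := by simpa using ha
      have hukey : ∀ e ∈ u, key e < key a := by
        intro e he
        have heF : e ∈ F := hF ▸ List.mem_append_left _ he
        have hne : key e ≠ k := by
          have := hu e he; simpa using this
        rcases List.mem_cons.mp (hmem e heF) with h | h
        · exact absurd h hne
        · rw [hak]; exact hlt _ h
      have hvkey : ∀ e ∈ v, key e ≤ key a := by
        intro e he
        have heF : e ∈ F := hF ▸ List.mem_append_right _ (List.mem_cons_of_mem _ he)
        rcases List.mem_cons.mp (hmem e heF) with h | h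
        · rw [hak, h]
        · rw [hak]; exact le_of_lt (hlt _ h)
      have hmax : PySem.List.max? F key = some a := by
        rw [hF]; exact pvMax?_first key u v a hukey hvkey
      rw [hmax, List.flatMap_cons, hA]
      simp

-- concrete facts about the literal tables
lemma pvSorted_eq :
    PySem.List.sorted pvSyn.items (fun e => PySem.Str.len e.1) true =
      pvKs.flatMap (fun k => pvL.filter (fun e => pvKey e == k)) := by decide

lemma pvKeys_mem : ∀ e ∈ pvL, pvKey e ∈ pvKs := by decide

-- A's loop returns according to the first match of the list it scans
lemma pvLoopA_eq_head (xs : List (String × String × Bool)) (cl : String) :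
    pvLoopA xs cl =
      match (xs.filter (fun e => PySem.Str.isIn e.1 cl)).head? with
      | none => (cl, false)
      | some (term, metric, invert) => (PySem.Str.replace cl term metric, invert) := by
  induction xs with
  | nil => rfl
  | cons x t ih =>
    rcases x with ⟨term, metric, invert⟩
    rw [List.filter_cons]
    by_cases h : PySem.Str.isIn term cl = true
    · simp only [pvLoopA]
      rw [if_pos h, if_pos h, List.head?_cons]
      cases invert <;> rfl
    · simp only [Bool.not_eq_true] at h
      simp only [pvLoopA]
      rw [if_neg (by simp only [h, Bool.false_eq_true, not_false_eq_true]), if_neg (by simp only [h, Bool.false_eq_true, not_false_eq_true])]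
      exact ih

-- filter distributes over flatMap
lemma pvFilter_flatMap {α β : Type} (l : List β) (f : β → List α) (p : α → Bool) :
    (l.flatMap f).filter p = l.flatMap (fun b => (f b).filter p) := by
  induction l with
  | nil => rfl
  | cons x t ih => simp [List.flatMap_cons, List.filter_append, ih]

lemma pvFilter_comm {α : Type} (l : List α) (p q : α → Bool) :
    (l.filter q).filter p = (l.filter p).filter q := by
  simp only [List.filter_filter]
  exact List.filter_congr (fun a _ => Bool.and_comm _ _)

-- A's sorted scan equals the argmax over the matching items, for every claim_lower
lemma pvMainA (cl : String) :
    pvLoopA (PySem.List.sorted pvSyn.items (fun e => PySem.Str.len e.1) true) cl =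
      (match PySem.List.max? (pvL.filter (fun e => PySem.Str.isIn e.1 cl)) pvKey with
      | none => (cl, false)
      | some (term, metric, invert) => (PySem.Str.replace cl term metric, invert)) := by
  rw [pvLoopA_eq_head, pvSorted_eq]
  rw [pvFilter_flatMap]
  have hgroups :
      (fun k => (pvL.filter (fun e => pvKey e == k)).filter (fun e => PySem.Str.isIn e.1 cl)) =
      (fun k => (pvL.filter (fun e => PySem.Str.isIn e.1 cl)).filter (fun e => pvKey e == k)) := by
    funext k; exact pvFilter_comm pvL _ _
  rw [hgroups]
  rw [pvMax?_groups pvKey pvKs (pvL.filter (fun e => PySem.Str.isIn e.1 cl))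
        (by decide)
        (fun e he => pvKeys_mem e (List.mem_of_mem_filter he))]

-- B's step on a flattened triple
def pvStepT (cl : String) (best : Option (String × String × Bool))
    (e : String × String × Bool) : Option (String × String × Bool) :=
  pvUpd cl e.2.1 e.2.2 best e.1

def pvFlat (g : String × Bool × List String) : List (String × String × Bool) :=
  g.2.2.map (fun t => (t, g.1, g.2.1))

-- B's nested loops = one fold over the flattened table
lemma pvNested_eq_flat (cl : String) (gs : List (String × Bool × List String)) :
    ∀ acc, gs.foldl (fun best g => g.2.2.foldl (pvUpd cl g.1 g.2.1) best) acc =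
      (gs.flatMap pvFlat).foldl (pvStepT cl) acc := by
  induction gs with
  | nil => intro acc; rfl
  | cons g t ih =>
    intro acc
    rw [List.foldl_cons, List.flatMap_cons, List.foldl_append, ih]
    congr 1
    rw [pvFlat, List.foldl_map]
    rfl

lemma pvFlat_groups : pvGroups.flatMap pvFlat = pvL := by decide

-- B's guarded fold = the Python-max fold over the filtered list
lemma pvFold_filter (cl : String) (xs : List (String × String × Bool)) :
    ∀ acc, xs.foldl (pvStepT cl) acc =
      (xs.filter (fun e => PySem.Str.isIn e.1 cl)).foldl (pvStep pvKey) acc := by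
  induction xs with
  | nil => intro acc; rfl
  | cons x t ih =>
    intro acc
    rw [List.foldl_cons, List.filter_cons]
    rcases x with ⟨term, metric, invert⟩
    by_cases h : PySem.Str.isIn term cl = true
    · rw [if_pos h, List.foldl_cons, ih]
      congr 1
      simp only [PySem.Str.isIn_eq] at h
      cases acc with
      | none => simp [pvStepT, pvUpd, pvStep, h]
      | some m => simp [pvStepT, pvUpd, pvStep, pvKey, h]
    · rw [if_neg (by exact h), ih]
      congr 1
      have h' : PySem.Chars.isIn term.toList cl.toList = false := by
        simpa using h
      simp [pvStepT, pvUpd, h']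

-- ===== VERDICT (by name: the statement is the Claim_ definition above) =====
theorem normalize_claim_with_synonyms_py_spec : Claim_equal_normalize_claim_with_synonyms_py := by
  intro claim _
  show pvLoopA (PySem.List.sorted pvSyn.items (fun e => PySem.Str.len e.1) true)
        (PySem.Str.lower claim) =
      (match pvGroups.foldl
          (fun best g => g.2.2.foldl (pvUpd (PySem.Str.lower claim) g.1 g.2.1) best) none with
      | none => (PySem.Str.lower claim, false)
      | some (term, metric, invert) =>
          (PySem.Str.replace (PySem.Str.lower claim) term metric, invert))
  rw [pvMainA, pvNested_eq_flat, pvFlat_groups, pvFold_filter, ← pvMax?_eq_foldl]
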